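-- pv_equiv track=rewrite | github.com/elkhaligy/LeetCode | Contests/Biweekly Contest 134/3208. Alternating Groups II.py | numberOfAlternatingGroups_sliding_window_1
-- ===== SOURCE A (Python) =====
-- def numberOfAlternatingGroups_sliding_window_1(colors: list[int], k: int) -> int:
--     n = len(colors)
--     groups = 0
--
--     if k > n:
--         return 0
--
--     curr_trans = 0
--     for i in range(k - 1):
--         if colors[i % n] != colors[(i + 1) % n]:
--             curr_trans += 1
--
--     if curr_trans == k - 1:
--         groups += 1
--
--     for start in range(1, n):
--         left = (start - 1) % n
--         right = (start + k - 2) % n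
--
--         if colors[left] != colors[start % n]:
--             curr_trans -= 1
--         if colors[right] != colors[(start + k - 1) % n]:
--             curr_trans += 1
--
--         if curr_trans == k - 1:
--             groups += 1
--
--     return groups
-- ===== SOURCE B (Python) =====
-- def numberOfAlternatingGroups_sliding_window_1(colors: list[int], k: int) -> int:
--     n = len(colors)
--     if k > n:
--         return 0
--     groups = 0
--     run = 1
--     for i in range(1, 2 * n):
--         if colors[i % n] != colors[(i - 1) % n]:
--             run += 1
--         else:
--             run = 1
--         if i >= n and run >= k:
--             groups += 1
--     return groups
-- ===== Notes on version B (the rewrite author's own statement) =====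
-- stated objective: alternative
-- what changed: Replaces A's sliding transition-counter (seed window plus incremental left/right updates per start) with a single run-length walk over the doubled circular indices that counts a window at each ending position with run >= k.
-- outside the precondition, e.g. on numberOfAlternatingGroups_sliding_window_1([0, 1], 0): A returns 0, B returns 2; on numberOfAlternatingGroups_sliding_window_1([0, 0, 1, 1, 0], 0): A returns 2, B returns 5; on numberOfAlternatingGroups_sliding_window_1([0, 1], -1): A returns 0, B returns 2
import Mathlib
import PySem

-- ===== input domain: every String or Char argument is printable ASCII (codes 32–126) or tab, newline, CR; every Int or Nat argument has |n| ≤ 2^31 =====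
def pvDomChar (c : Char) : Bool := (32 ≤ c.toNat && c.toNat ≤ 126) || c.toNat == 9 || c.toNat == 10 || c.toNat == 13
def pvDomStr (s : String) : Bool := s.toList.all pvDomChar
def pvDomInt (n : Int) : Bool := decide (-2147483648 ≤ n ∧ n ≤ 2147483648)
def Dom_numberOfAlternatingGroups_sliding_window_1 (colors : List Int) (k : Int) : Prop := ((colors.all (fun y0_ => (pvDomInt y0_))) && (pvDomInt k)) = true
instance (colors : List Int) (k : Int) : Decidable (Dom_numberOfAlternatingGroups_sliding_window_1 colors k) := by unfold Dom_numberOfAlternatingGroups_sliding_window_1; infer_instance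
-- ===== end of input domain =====

-- B replaces A's sliding transition-counter with a run-length walk over doubled circular
-- indices: a different decomposition of the same count, at the same cost.

-- ===== PORT A =====
def numberOfAlternatingGroups_sliding_window_1 (colors : List Int) (k : Int) : Int :=
  let n : Int := colors.length
  if k > n then 0
  else
    let ct : Int := (PySem.List.pyRange 0 (k - 1) 1).foldl
      (fun ct i =>
        if PySem.List.pyGetD colors (PySem.Int.mod i n) 0 ≠ PySem.List.pyGetD colors (PySem.Int.mod (i + 1) n) 0
        then ct + 1 else ct) 0
    let groups : Int := 0
    let groups : Int := if ct = k - 1 then groups + 1 else groups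
    ((PySem.List.pyRange 1 n 1).foldl
      (fun (st : Int × Int) start =>
        let left := PySem.Int.mod (start - 1) n
        let right := PySem.Int.mod (start + k - 2) n
        let ct1 : Int :=
          if PySem.List.pyGetD colors left 0 ≠ PySem.List.pyGetD colors (PySem.Int.mod start n) 0
          then st.1 - 1 else st.1
        let ct2 : Int :=
          if PySem.List.pyGetD colors right 0 ≠ PySem.List.pyGetD colors (PySem.Int.mod (start + k - 1) n) 0
          then ct1 + 1 else ct1
        (ct2, if ct2 = k - 1 then st.2 + 1 else st.2))
      (ct, groups)).2

-- ===== PORT B =====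
def numberOfAlternatingGroups_sliding_window_1_alt (colors : List Int) (k : Int) : Int :=
  let n : Int := colors.length
  if k > n then 0
  else
    ((PySem.List.pyRange 1 (2 * n) 1).foldl
      (fun (st : Int × Int) i =>
        let run : Int :=
          if PySem.List.pyGetD colors (PySem.Int.mod i n) 0 ≠ PySem.List.pyGetD colors (PySem.Int.mod (i - 1) n) 0
          then st.2 + 1 else 1
        (if n ≤ i ∧ k ≤ run then st.1 + 1 else st.1, run))
      (0, 1)).1

-- ===== PRECONDITION & SPEC =====
-- Pre_ restricts to the natural domain k ≥ 1 (a group length is a positive count): for k ≤ 0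
-- the values A returns are an artefact of its transition counter being compared against the
-- negative target k - 1, which B's run-length algorithm has no reason to reproduce.
def Pre_numberOfAlternatingGroups_sliding_window_1 (colors : List Int) (k : Int) : Prop := 1 ≤ k
instance (colors : List Int) (k : Int) : Decidable (Pre_numberOfAlternatingGroups_sliding_window_1 colors k) := by unfold Pre_numberOfAlternatingGroups_sliding_window_1; infer_instance
def pvWitness_numberOfAlternatingGroups_sliding_window_1 : List Int × Int := ([0, 1, 0, 1], 2)
def Spec_numberOfAlternatingGroups_sliding_window_1 (colors : List Int) (k : Int) (out : Int) : Prop := out = numberOfAlternatingGroups_sliding_window_1_alt colors k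
instance (colors : List Int) (k : Int) (out : Int) : Decidable (Spec_numberOfAlternatingGroups_sliding_window_1 colors k out) := by unfold Spec_numberOfAlternatingGroups_sliding_window_1; infer_instance

-- ===== CLAIM (what is proved, stated in full; the proofs are below) =====
def Claim_equal_numberOfAlternatingGroups_sliding_window_1 : Prop := ∀ (colors : List Int) (k : Int), Dom_numberOfAlternatingGroups_sliding_window_1 colors k → Pre_numberOfAlternatingGroups_sliding_window_1 colors k → Spec_numberOfAlternatingGroups_sliding_window_1 colors k (numberOfAlternatingGroups_sliding_window_1 colors k)

-- ===== LEMMAS AND PROOFS =====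

def Tc (c : Int → Int) (k s : Int) : Int :=
  ((PySem.List.pyRange s (s + (k - 1)) 1).map (fun j => if c j ≠ c (j + 1) then (1 : Int) else 0)).sum

def rc (c : Int → Int) : Nat → Int
  | 0 => 1
  | (i + 1) => if c ((i : Int) + 1) ≠ c (i : Int) then rc c i + 1 else 1

def Gc (c : Int → Int) (k a b : Int) : Int :=
  ((PySem.List.pyRange a b 1).map (fun s => if Tc c k s = k - 1 then (1 : Int) else 0)).sum

theorem sumIf_le (l : List Int) (P : Int → Prop) [DecidablePred P] :
    ((l.map (fun j => if P j then (1:Int) else 0)).sum ≤ l.length) := by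
  induction l with
  | nil => simp
  | cons x xs ih =>
    simp only [List.map_cons, List.sum_cons, List.length_cons]
    split_ifs <;> push_cast <;> omega

theorem sumIf_eq_iff (l : List Int) (P : Int → Prop) [DecidablePred P] :
    ((l.map (fun j => if P j then (1:Int) else 0)).sum = l.length) ↔ ∀ j ∈ l, P j := by
  induction l with
  | nil => simp
  | cons x xs ih =>
    have hle := sumIf_le xs P
    simp only [List.map_cons, List.sum_cons, List.length_cons, List.mem_cons]
    split_ifs with h
    · constructor
      · intro he j hj
        rcases hj with rfl | hj
        · exact h
        · exact ih.mp (by push_cast at he ⊢; omega) j hj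
      · intro ha
        have : ((xs.map (fun j => if P j then (1:Int) else 0)).sum = xs.length) :=
          ih.mpr (fun j hj => ha j (Or.inr hj))
        push_cast; omega
    · constructor
      · intro he; exfalso; push_cast at he; omega
      · intro ha; exact absurd (ha x (Or.inl rfl)) h

theorem Tc_crit (c : Int → Int) (k : Int) (hk : 1 ≤ k) (s : Int) :
    Tc c k s = k - 1 ↔ ∀ j, s ≤ j → j < s + (k - 1) → c j ≠ c (j + 1) := by
  have hl : (((PySem.List.pyRange s (s + (k - 1)) 1).length : Int)) = k - 1 := by
    rw [PySem.List.length_pyRange_one]; omega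
  constructor
  · intro h j h1 h2
    refine (sumIf_eq_iff _ (fun j => c j ≠ c (j + 1))).mp ?_ j (PySem.List.mem_pyRange_one.mpr ⟨h1, h2⟩)
    unfold Tc at h; omega
  · intro h
    unfold Tc
    have := (sumIf_eq_iff (PySem.List.pyRange s (s + (k - 1)) 1) (fun j => c j ≠ c (j + 1))).mpr
      (fun j hj => h j (PySem.List.mem_pyRange_one.mp hj).1 (PySem.List.mem_pyRange_one.mp hj).2)
    omega

theorem Tc_step (c : Int → Int) (k : Int) (hk : 1 ≤ k) (s : Int) :
    Tc c k (s + 1) = Tc c k s - (if c s ≠ c (s + 1) then 1 else 0)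
      + (if c (s + (k - 1)) ≠ c (s + (k - 1) + 1) then 1 else 0) := by
  rcases eq_or_lt_of_le hk with h1 | h2
  · have e1 : s + 1 + (k - 1) = s + 1 := by omega
    have e2 : s + (k - 1) = s := by omega
    unfold Tc
    rw [e1, e2, PySem.List.pyRange_one_eq_nil (le_refl _), PySem.List.pyRange_one_eq_nil (le_refl _)]
    simp
  · -- 2 ≤ k
    unfold Tc
    rw [PySem.List.pyRange_one_cons (by omega : s < s + (k - 1))]
    rw [show s + 1 + (k - 1) = (s + (k - 1)) + 1 by ring]
    rw [PySem.List.pyRange_one_succ_right (by omega : s + 1 ≤ s + (k - 1))]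
    simp only [List.map_cons, List.sum_cons, List.map_append, List.sum_append,
      List.map_cons, List.sum_cons, List.map_nil, List.sum_nil]
    split_ifs <;> ring

theorem rc_pos (c : Int → Int) (i : Nat) : 1 ≤ rc c i := by
  cases i with
  | zero => simp [rc]
  | succ n => unfold rc; split_ifs with h
              · have := rc_pos c n; omega
              · omega

theorem rc_ge (c : Int → Int) (m : Nat) : ∀ i : Nat, m ≤ i →
    (((m : Int) + 1 ≤ rc c i) ↔ ∀ j : Nat, i - m ≤ j → j < i → c ((j : Int) + 1) ≠ c (j : Int)) := by
  induction m with
  | zero =>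
    intro i _
    constructor
    · intro _ j h1 h2; omega
    · intro _; have := rc_pos c i; omega
  | succ m ih =>
    intro i hi
    obtain ⟨i', rfl⟩ : ∃ i', i = i' + 1 := ⟨i - 1, by omega⟩
    unfold rc
    split_ifs with h
    · have := ih i' (by omega)
      constructor
      · intro hr j h1 h2
        rcases Nat.lt_or_ge j i' with hj | hj
        · exact (this.mp (by omega)) j (by omega) hj
        · have : j = i' := by omega
          subst this; exact h
      · intro ha
        have : (m : Int) + 1 ≤ rc c i' := this.mpr (fun j h1 h2 => ha j (by omega) (by omega))
        omega
    · constructor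
      · intro hr; exfalso; omega
      · intro ha; exact absurd (ha i' (by omega) (by omega)) h

theorem pyRange_map_shift (a b t : Int) (f : Int → Int) :
    (PySem.List.pyRange (a + t) (b + t) 1).map f
      = (PySem.List.pyRange a b 1).map (fun x => f (x + t)) := by
  rw [PySem.List.pyRange_one, PySem.List.pyRange_one]
  rw [show b + t - (a + t) = b - a by ring]
  rw [List.map_map, List.map_map]
  apply List.map_congr_left
  intro x _
  simp only [Function.comp_apply]
  ring_nf

theorem Tc_per (c : Int → Int) (k n : Int) (hper : ∀ j, c (j + n) = c j) (s : Int) :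
    Tc c k (s + n) = Tc c k s := by
  unfold Tc
  rw [show s + n + (k - 1) = (s + (k - 1)) + n by ring]
  rw [pyRange_map_shift s (s + (k - 1)) n]
  apply congrArg
  apply List.map_congr_left
  intro x _
  rw [show x + n + 1 = (x + 1) + n by ring, hper, hper]

theorem Gc_per (c : Int → Int) (k n : Int) (hper : ∀ j, c (j + n) = c j) (hn : 1 ≤ n) (a : Int) :
    Gc c k (a + 1) (a + 1 + n) = Gc c k a (a + n) := by
  unfold Gc
  rw [show a + 1 + n = (a + n) + 1 by ring]
  rw [PySem.List.pyRange_one_succ_right (by omega : a + 1 ≤ a + n)]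
  rw [PySem.List.pyRange_one_cons (by omega : a < a + n)]
  simp only [List.map_append, List.sum_append, List.map_cons, List.sum_cons, List.map_nil,
    List.sum_nil]
  rw [Tc_per c k n hper a]
  ring

theorem Gc_cast (c : Int → Int) (k n : Int) (hper : ∀ j, c (j + n) = c j) (hn : 1 ≤ n) :
    ∀ m : Nat, Gc c k (m : Int) ((m : Int) + n) = Gc c k 0 (0 + n) := by
  intro m
  induction m with
  | zero => norm_num
  | succ m ih =>
    rw [show ((m + 1 : Nat) : Int) = (m : Int) + 1 by push_cast; ring]
    rw [Gc_per c k n hper hn (m : Int), ih]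

theorem key_iff (c : Int → Int) (k n : Int) (hk : 1 ≤ k) (hkn : k ≤ n) (i : Nat)
    (hi : n ≤ (i : Int)) :
    (k ≤ rc c i) ↔ Tc c k ((i : Int) - (k - 1)) = k - 1 := by
  rw [Tc_crit c k hk]
  have hm : ((k - 1).toNat : Int) = k - 1 := Int.toNat_of_nonneg (by omega)
  have hmi : (k - 1).toNat ≤ i := by omega
  rw [show k = (((k - 1).toNat : Int)) + 1 by omega]
  rw [rc_ge c (k - 1).toNat i hmi]
  constructor
  · intro h j h1 h2
    have hj0 : 0 ≤ j := by omega
    have : c ((j.toNat : Int) + 1) ≠ c (j.toNat : Int) := by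
      apply h j.toNat <;> omega
    rw [Int.toNat_of_nonneg hj0] at this
    exact fun he => this he.symm
  · intro h j h1 h2
    have : c (j : Int) ≠ c ((j : Int) + 1) := by
      apply h (j : Int) <;> omega
    exact fun he => this he.symm

def Cf (colors : List Int) (j : Int) : Int :=
  PySem.List.pyGetD colors (PySem.Int.mod j (colors.length : Int)) 0

theorem Cf_eq (colors : List Int) (j : Int) :
    PySem.List.pyGetD colors (PySem.Int.mod j (colors.length : Int)) 0 = Cf colors j := rfl

theorem Cf_per (colors : List Int) (hn : 0 < (colors.length : Int)) (j : Int) :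
    Cf colors (j + (colors.length : Int)) = Cf colors j := by
  unfold Cf
  rw [PySem.Int.mod_eq_emod_of_pos hn, PySem.Int.mod_eq_emod_of_pos hn]
  rw [show j + (colors.length : Int) = j + (colors.length : Int) * 1 by ring,
    Int.add_mul_emod_self_left]

theorem foldl_if_sum (P : Int → Prop) [DecidablePred P] :
    ∀ (l : List Int) (c0 : Int),
    l.foldl (fun ct i => if P i then ct + 1 else ct) c0
      = c0 + (l.map (fun j => if P j then (1 : Int) else 0)).sum := by
  intro l
  induction l with
  | nil => simp
  | cons x xs ih =>
    intro c0
    simp only [List.foldl_cons, List.map_cons, List.sum_cons]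
    split_ifs <;> rw [ih] <;> ring

theorem A_fold (colors : List Int) (k : Int) (hk : 1 ≤ k) (g : Int) : ∀ m : Nat,
    ((PySem.List.pyRange 1 ((m : Int) + 1) 1).foldl
      (fun (st : Int × Int) start =>
        let left := PySem.Int.mod (start - 1) ((colors.length : Int))
        let right := PySem.Int.mod (start + k - 2) ((colors.length : Int))
        let ct1 : Int :=
          if PySem.List.pyGetD colors left 0 ≠ PySem.List.pyGetD colors (PySem.Int.mod start ((colors.length : Int))) 0
          then st.1 - 1 else st.1
        let ct2 : Int :=
          if PySem.List.pyGetD colors right 0 ≠ PySem.List.pyGetD colors (PySem.Int.mod (start + k - 1) ((colors.length : Int))) 0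
          then ct1 + 1 else ct1
        (ct2, if ct2 = k - 1 then st.2 + 1 else st.2))
      (Tc (Cf colors) k 0, g))
    = (Tc (Cf colors) k (m : Int), g + Gc (Cf colors) k 1 ((m : Int) + 1)) := by
  intro m
  induction m with
  | zero =>
    rw [show (((0:Nat) : Int) + 1) = 1 by norm_num]
    rw [PySem.List.pyRange_one_eq_nil (le_refl 1)]
    unfold Gc
    rw [PySem.List.pyRange_one_eq_nil (le_refl 1)]
    norm_num
  | succ m ih =>
    rw [show ((m+1:Nat) : Int) = (m : Int) + 1 by push_cast; ring]
    rw [PySem.List.pyRange_one_succ_right (by omega : (1:Int) ≤ (m:Int)+1)]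
    rw [List.foldl_append, ih]
    have hstep := Tc_step (Cf colors) k hk (m : Int)
    have hG : Gc (Cf colors) k 1 ((m:Int)+1+1) = Gc (Cf colors) k 1 ((m:Int)+1)
        + (if Tc (Cf colors) k ((m:Int)+1) = k - 1 then 1 else 0) := by
      unfold Gc
      rw [PySem.List.pyRange_one_succ_right (by omega : (1:Int) ≤ (m:Int)+1)]
      simp
    rw [hG]
    simp only [List.foldl_cons, List.foldl_nil, Cf_eq]
    rw [show (m:Int) + 1 - 1 = (m:Int) by ring,
        show (m:Int) + 1 + k - 2 = (m:Int) + (k - 1) by ring,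
        show (m:Int) + 1 + k - 1 = (m:Int) + (k - 1) + 1 by ring]
    rw [Prod.mk.injEq]
    rw [hstep]
    constructor <;> split_ifs <;> omega

theorem B_fold (colors : List Int) (k : Int) : ∀ m : Nat,
    ((PySem.List.pyRange 1 ((m : Int) + 1) 1).foldl
      (fun (st : Int × Int) i =>
        let run : Int :=
          if PySem.List.pyGetD colors (PySem.Int.mod i (colors.length : Int)) 0 ≠ PySem.List.pyGetD colors (PySem.Int.mod (i - 1) (colors.length : Int)) 0
          then st.2 + 1 else 1
        (if (colors.length : Int) ≤ i ∧ k ≤ run then st.1 + 1 else st.1, run))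
      (0, 1))
    = (((PySem.List.pyRange 1 ((m : Int) + 1) 1).map
        (fun i => if (colors.length : Int) ≤ i ∧ k ≤ rc (Cf colors) i.toNat then (1 : Int) else 0)).sum,
       rc (Cf colors) m) := by
  intro m
  induction m with
  | zero =>
    rw [show (((0:Nat):Int)+1) = 1 by norm_num, PySem.List.pyRange_one_eq_nil (le_refl 1)]
    simp [rc]
  | succ m ih =>
    rw [show ((m+1:Nat):Int) = (m:Int)+1 by push_cast; ring]
    rw [PySem.List.pyRange_one_succ_right (by omega : (1:Int) ≤ (m:Int)+1)]
    rw [List.foldl_append, ih]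
    simp only [List.foldl_cons, List.foldl_nil, Cf_eq, List.map_append, List.sum_append,
      List.map_cons, List.sum_cons, List.map_nil, List.sum_nil]
    rw [show (m:Int)+1-1 = (m:Int) by ring]
    rw [show ((m:Int)+1).toNat = m + 1 by omega]
    have hrc : rc (Cf colors) (m+1)
        = if Cf colors ((m:Int)+1) ≠ Cf colors (m:Int) then rc (Cf colors) m + 1 else 1 := rfl
    rw [Prod.mk.injEq, hrc]
    constructor <;> split_ifs <;> omega

theorem B_count (colors : List Int) (k : Int) (hk : 1 ≤ k) (hkn : k ≤ (colors.length : Int)) :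
    ((PySem.List.pyRange 1 (2 * (colors.length : Int)) 1).map
      (fun i => if (colors.length : Int) ≤ i ∧ k ≤ rc (Cf colors) i.toNat then (1 : Int) else 0)).sum
    = Gc (Cf colors) k 0 (0 + (colors.length : Int)) := by
  have hn : (1:Int) ≤ (colors.length : Int) := le_trans hk hkn
  rw [PySem.List.pyRange_one_append 1 (colors.length : Int) (2 * (colors.length : Int))
    (by omega) (by omega)]
  rw [List.map_append, List.sum_append]
  have h0 : ((PySem.List.pyRange 1 (colors.length : Int) 1).map
      (fun i => if (colors.length : Int) ≤ i ∧ k ≤ rc (Cf colors) i.toNat then (1 : Int) else 0)).sum = 0 := by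
    apply List.sum_eq_zero
    intro x hx
    simp only [List.mem_map] at hx
    obtain ⟨i, hi, rfl⟩ := hx
    have hm := PySem.List.mem_pyRange_one.mp hi
    rw [if_neg]
    intro hcon
    omega
  rw [h0]
  have h1 : ((PySem.List.pyRange (colors.length : Int) (2 * (colors.length : Int)) 1).map
      (fun i => if (colors.length : Int) ≤ i ∧ k ≤ rc (Cf colors) i.toNat then (1 : Int) else 0))
      = ((PySem.List.pyRange (colors.length : Int) (2 * (colors.length : Int)) 1).map
      (fun i => if Tc (Cf colors) k (i - (k - 1)) = k - 1 then (1 : Int) else 0)) := by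
    apply List.map_congr_left
    intro i hi
    have hm := PySem.List.mem_pyRange_one.mp hi
    have h0i : 0 ≤ i := by omega
    have hiN : ((i.toNat : Nat) : Int) = i := Int.toNat_of_nonneg h0i
    have hk2 := key_iff (Cf colors) k (colors.length : Int) hk hkn i.toNat (by omega)
    rw [hiN] at hk2
    refine if_congr ?_ rfl rfl
    constructor
    · intro h; exact hk2.mp h.2
    · intro h; exact ⟨hm.1, hk2.mpr h⟩
  rw [h1]
  have e1 : PySem.List.pyRange (colors.length : Int) (2 * (colors.length : Int)) 1
      = PySem.List.pyRange (((colors.length : Int) - (k - 1)) + (k - 1))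
        ((((colors.length : Int) - (k - 1)) + (colors.length : Int)) + (k - 1)) 1 := by
    congr 1 <;> ring
  rw [e1, pyRange_map_shift]
  have h2 : ((PySem.List.pyRange ((colors.length : Int) - (k - 1))
        (((colors.length : Int) - (k - 1)) + (colors.length : Int)) 1).map
      (fun x => if Tc (Cf colors) k (x + (k - 1) - (k - 1)) = k - 1 then (1 : Int) else 0))
      = ((PySem.List.pyRange ((colors.length : Int) - (k - 1))
        (((colors.length : Int) - (k - 1)) + (colors.length : Int)) 1).map
      (fun x => if Tc (Cf colors) k x = k - 1 then (1 : Int) else 0)) := by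
    apply List.map_congr_left
    intro x _
    rw [show x + (k - 1) - (k - 1) = x by ring]
  rw [h2]
  have h3 : (((colors.length : Int) - (k - 1)).toNat : Int) = (colors.length : Int) - (k - 1) :=
    Int.toNat_of_nonneg (by omega)
  have h4 := Gc_cast (Cf colors) k (colors.length : Int) (Cf_per colors (by omega)) hn
    ((colors.length : Int) - (k - 1)).toNat
  rw [h3] at h4
  rw [zero_add]
  rw [← h4]
  unfold Gc
  norm_num

theorem A_eq (colors : List Int) (k : Int) (hk : 1 ≤ k) (hkn : k ≤ (colors.length : Int)) :
    numberOfAlternatingGroups_sliding_window_1 colors k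
    = Gc (Cf colors) k 0 (0 + (colors.length : Int)) := by
  have hn : (1:Int) ≤ (colors.length:Int) := le_trans hk hkn
  simp only [numberOfAlternatingGroups_sliding_window_1]
  rw [if_neg (by omega : ¬ k > (colors.length:Int))]
  have hc : (PySem.List.pyRange 0 (k - 1) 1).foldl
      (fun ct i =>
        if PySem.List.pyGetD colors (PySem.Int.mod i (colors.length : Int)) 0 ≠ PySem.List.pyGetD colors (PySem.Int.mod (i + 1) (colors.length : Int)) 0
        then ct + 1 else ct) 0 = Tc (Cf colors) k 0 := by
    rw [foldl_if_sum (fun i =>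
      PySem.List.pyGetD colors (PySem.Int.mod i (colors.length : Int)) 0 ≠ PySem.List.pyGetD colors (PySem.Int.mod (i + 1) (colors.length : Int)) 0)]
    unfold Tc
    rw [show (0:Int) + (k - 1) = k - 1 by ring]
    simp only [Cf_eq, zero_add]
    rfl
  rw [hc]
  have hA := A_fold colors k hk
    (if Tc (Cf colors) k 0 = k - 1 then (0:Int) + 1 else 0) (colors.length - 1)
  rw [show ((colors.length - 1 : Nat) : Int) + 1 = (colors.length : Int) by omega] at hA
  rw [hA]
  have hGc : Gc (Cf colors) k 0 (0 + (colors.length:Int))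
      = (if Tc (Cf colors) k 0 = k - 1 then (1:Int) else 0) + Gc (Cf colors) k 1 (colors.length:Int) := by
    unfold Gc
    rw [PySem.List.pyRange_one_cons (by omega : (0:Int) < 0 + (colors.length:Int))]
    simp only [List.map_cons, List.sum_cons]
    norm_num
  rw [hGc]
  split_ifs <;> omega

theorem B_eq (colors : List Int) (k : Int) (hk : 1 ≤ k) (hkn : k ≤ (colors.length : Int)) :
    numberOfAlternatingGroups_sliding_window_1_alt colors k
    = Gc (Cf colors) k 0 (0 + (colors.length : Int)) := by
  have hn : (1:Int) ≤ (colors.length:Int) := le_trans hk hkn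
  simp only [numberOfAlternatingGroups_sliding_window_1_alt]
  rw [if_neg (by omega : ¬ k > (colors.length:Int))]
  have hB := B_fold colors k (2 * colors.length - 1)
  rw [show ((2 * colors.length - 1 : Nat) : Int) + 1 = 2 * (colors.length : Int) by omega] at hB
  rw [hB]
  simpa using B_count colors k hk hkn

theorem final_eq (colors : List Int) (k : Int) (hk : 1 ≤ k) :
    numberOfAlternatingGroups_sliding_window_1 colors k
    = numberOfAlternatingGroups_sliding_window_1_alt colors k := by
  by_cases hgt : (colors.length:Int) < k
  · simp only [numberOfAlternatingGroups_sliding_window_1, numberOfAlternatingGroups_sliding_window_1_alt]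
    rw [if_pos (show k > (colors.length:Int) from hgt), if_pos (show k > (colors.length:Int) from hgt)]
  · have hkn : k ≤ (colors.length:Int) := by omega
    rw [A_eq colors k hk hkn, B_eq colors k hk hkn]

-- ===== VERDICT (by name: the statement is the Claim_ definition above) =====
theorem numberOfAlternatingGroups_sliding_window_1_spec : Claim_equal_numberOfAlternatingGroups_sliding_window_1 := by
  intro colors k _ hk
  unfold Spec_numberOfAlternatingGroups_sliding_window_1
  exact final_eq colors k hk
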